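-- pv_equiv track=rewrite | github.com/LiuYubo1995/RecipeQA | impatient_reader_visual/utils.py | transport_1_0_2_image
-- ===== SOURCE A (Python) =====
-- def transport_1_0_2_image(a):
--         max_step = 0
--         for i in a:
--             if max_step < len(i):
--                 max_step = len(i)
--         new = []
--         for i in range(max_step):
--             step = []
--             for j in a:
--                 if len(j) <= i:
--                     step.append(['empty'])
--                 else:
--                     step.append(j[i])
--             new.append(step)
--         return new
-- ===== SOURCE B (Python) =====
-- def transport_1_0_2_image(a):
--     # Reverse each row into a stack, then repeatedly pop one column of
--     # elements until every stack is exhausted; empty stacks yield ['empty'].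
--     stacks = [list(reversed(r)) for r in a]
--     new = []
--     while not all(not s for s in stacks):
--         new.append([s.pop() if s else ['empty'] for s in stacks])
--     return new
-- ===== Notes on version B (the rewrite author's own statement) =====
-- stated objective: alternative
-- what changed: Instead of computing max_step and indexing a[j][i] in nested index loops, B reverses each row into a stack once and repeatedly pops one whole column off the stacks until they are all empty (no length maximum, no indices).
import Mathlib
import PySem

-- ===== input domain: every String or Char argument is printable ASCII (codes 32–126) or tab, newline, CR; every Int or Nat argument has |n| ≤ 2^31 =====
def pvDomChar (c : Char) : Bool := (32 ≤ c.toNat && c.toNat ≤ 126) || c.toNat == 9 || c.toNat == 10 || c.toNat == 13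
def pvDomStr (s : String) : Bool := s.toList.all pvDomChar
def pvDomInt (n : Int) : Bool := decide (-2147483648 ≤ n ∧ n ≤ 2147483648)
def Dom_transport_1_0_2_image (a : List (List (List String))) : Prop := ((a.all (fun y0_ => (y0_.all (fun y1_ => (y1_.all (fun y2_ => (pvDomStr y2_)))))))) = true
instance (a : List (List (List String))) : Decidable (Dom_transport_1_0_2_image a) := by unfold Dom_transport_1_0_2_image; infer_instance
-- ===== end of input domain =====

-- B replaces A's max-length computation and nested index loops by reversing each
-- row into a stack once and popping one whole column per step (alternative; same cost).

-- ===== PORT A =====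
-- literal transliteration of A: fold for max_step, then two accumulator loops.
-- j[i] is only read under the guard i < j.length, so getD is exact there.
def transport_1_0_2_image (a : List (List (List String))) : List (List (List String)) :=
  let max_step := a.foldl (fun ms i => if ms < i.length then i.length else ms) 0
  (List.range max_step).foldl
    (fun new i =>
      new ++ [a.foldl (fun step j =>
        step ++ [if j.length ≤ i then ["empty"] else j.getD i []]) []])
    []

-- ===== PORT B =====
-- termination measure helper for the while loop (cited in decreasing_by):
-- popping (dropLast) strictly shrinks the total stack size while some stack is nonempty
theorem pvDropSum_lt (s : List (List (List String))) (h : ¬ s.all List.isEmpty = true) :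
    ((s.map List.dropLast).map List.length).sum < (s.map List.length).sum := by
  induction s with
  | nil => simp at h
  | cons x xs ih =>
    simp only [List.all_cons, Bool.and_eq_true, not_and_or] at h
    simp only [List.map_cons, List.sum_cons, List.length_dropLast]
    rcases h with h | h
    · have hx : x ≠ [] := by cases x <;> simp_all
      have hxl : 0 < x.length := List.length_pos_iff.mpr hx
      have hle : ((xs.map List.dropLast).map List.length).sum ≤ (xs.map List.length).sum := by
        clear ih h hx hxl
        induction xs with
        | nil => simp
        | cons z zs ihz =>
          simp only [List.map_cons, List.sum_cons, List.length_dropLast]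
          omega
      omega
    · have := ih h
      omega

-- the while loop: pop one column off the sts until all are empty
-- (s.pop() is only taken when s is nonempty, so getLastD/dropLast are exact)
def pvPopLoop (sts : List (List (List String))) : List (List (List String)) :=
  if h : sts.all List.isEmpty then []
  else (sts.map (fun s => if s = [] then ["empty"] else s.getLastD [])) ::
       pvPopLoop (sts.map List.dropLast)
termination_by (sts.map List.length).sum
decreasing_by simpa using pvDropSum_lt sts h

-- transliteration of B: build the reversed stacks, then run the pop loop
def transport_1_0_2_image_alt (a : List (List (List String))) : List (List (List String)) :=
  pvPopLoop (a.map List.reverse)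

-- ===== PRECONDITION & SPEC =====
def Spec_transport_1_0_2_image (a : List (List (List String))) (out : List (List (List String))) : Prop := out = transport_1_0_2_image_alt a
instance (a : List (List (List String))) (out : List (List (List String))) : Decidable (Spec_transport_1_0_2_image a out) := by unfold Spec_transport_1_0_2_image; infer_instance

-- ===== CLAIM (what is proved, stated in full; the proofs are below) =====
def Claim_equal_transport_1_0_2_image : Prop := ∀ (a : List (List (List String))), Dom_transport_1_0_2_image a → Spec_transport_1_0_2_image a (transport_1_0_2_image a)

-- ===== LEMMAS AND PROOFS =====

-- common specification: column i of the padded transpose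
def pvCol (a : List (List (List String))) (i : Nat) : List (List String) :=
  a.map (fun j => if j.length ≤ i then ["empty"] else j.getD i [])

-- maximum row length
def pvMx (a : List (List (List String))) : Nat :=
  (a.map List.length).foldr max 0

theorem pvFoldl_push {α β : Type} (f : α → β) (l : List α) (init : List β) :
    l.foldl (fun acc x => acc ++ [f x]) init = init ++ l.map f := by
  induction l generalizing init with
  | nil => simp
  | cons x xs ih => simp [ih, List.append_assoc]

theorem pvFoldl_max (a : List (List (List String))) (n : Nat) :
    a.foldl (fun ms i => if ms < i.length then i.length else ms) n = max n (pvMx a) := by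
  induction a generalizing n with
  | nil => simp [pvMx]
  | cons x xs ih =>
    simp only [List.foldl, ih, pvMx, List.map_cons, List.foldr]
    split <;> omega

theorem pvA_cols (a : List (List (List String))) :
    transport_1_0_2_image a = (List.range (pvMx a)).map (pvCol a) := by
  unfold transport_1_0_2_image
  rw [pvFoldl_max]
  simp only [Nat.zero_max]
  rw [pvFoldl_push (fun i => a.foldl (fun step j =>
        step ++ [if j.length ≤ i then ["empty"] else j.getD i []]) [])]
  simp only [List.nil_append]
  apply List.map_congr_left
  intro i _
  have := pvFoldl_push (fun j => if j.length ≤ i then ["empty"] else j.getD i []) a []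
  simpa [pvCol] using this

theorem pvMx_tails (a : List (List (List String))) :
    pvMx (a.map List.tail) = pvMx a - 1 := by
  induction a with
  | nil => simp [pvMx]
  | cons x xs ih =>
    simp only [pvMx, List.map_cons, List.foldr] at *
    have : x.tail.length = x.length - 1 := by cases x <;> simp
    omega

theorem pvMx_zero_iff (a : List (List (List String))) :
    pvMx a = 0 ↔ a.all List.isEmpty = true := by
  induction a with
  | nil => simp [pvMx]
  | cons x xs ih =>
    simp only [pvMx, List.map_cons, List.foldr, List.all_cons, Bool.and_eq_true] at *
    rw [← ih]
    cases x <;> simp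

theorem pvCol_zero (a : List (List (List String))) :
    pvCol a 0 = a.map (fun j => j.headD ["empty"]) := by
  apply List.map_congr_left
  intro j _
  cases j <;> simp

theorem pvCol_succ (a : List (List (List String))) (i : Nat) :
    pvCol a (i + 1) = pvCol (a.map List.tail) i := by
  unfold pvCol
  rw [List.map_map]
  apply List.map_congr_left
  intro j _
  cases j with
  | nil => simp
  | cons y ys => simp

-- bridging the stack view and the row view: a reversed row's last element is its head,
-- and popping a reversed row is reversing its tail
theorem pvRev_all_empty (a : List (List (List String))) :
    (a.map List.reverse).all List.isEmpty = a.all List.isEmpty := by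
  induction a with
  | nil => rfl
  | cons x xs ih => cases x <;> simp_all

theorem pvRev_pop_col (a : List (List (List String))) :
    (a.map List.reverse).map (fun s => if s = [] then ["empty"] else s.getLastD []) =
      a.map (fun j => j.headD ["empty"]) := by
  rw [List.map_map]
  apply List.map_congr_left
  intro j _
  cases j with
  | nil => simp
  | cons y ys => simp [List.reverse_cons]

theorem pvRev_drop (a : List (List (List String))) :
    (a.map List.reverse).map List.dropLast = (a.map List.tail).map List.reverse := by
  simp only [List.map_map]
  apply List.map_congr_left
  intro j _
  cases j with
  | nil => simp
  | cons y ys => simp [List.reverse_cons]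

theorem pvB_cols (n : Nat) (a : List (List (List String))) (h : pvMx a = n) :
    pvPopLoop (a.map List.reverse) = (List.range n).map (pvCol a) := by
  induction n generalizing a with
  | zero =>
    unfold pvPopLoop
    rw [dif_pos (by rw [pvRev_all_empty]; exact (pvMx_zero_iff a).mp h)]
    simp
  | succ m ih =>
    have hne : ¬ (a.map List.reverse).all List.isEmpty = true := by
      rw [pvRev_all_empty]
      intro hall
      rw [← pvMx_zero_iff] at hall
      omega
    unfold pvPopLoop
    rw [dif_neg hne]
    have hT : pvMx (a.map List.tail) = m := by simp [pvMx_tails, h]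
    rw [pvRev_drop, ih (a.map List.tail) hT, pvRev_pop_col,
      List.range_succ_eq_map, List.map_cons, List.map_map, pvCol_zero]
    congr 1
    apply List.map_congr_left
    intro i _
    simp [Function.comp, pvCol_succ]

-- ===== VERDICT (by name: the statement is the Claim_ definition above) =====
theorem transport_1_0_2_image_spec : Claim_equal_transport_1_0_2_image := by
  intro a _
  unfold Spec_transport_1_0_2_image transport_1_0_2_image_alt
  rw [pvA_cols, pvB_cols (pvMx a) a rfl]
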